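-- pv_equiv track=rewrite | github.com/felixhirschfeld/DeckyZone | main.py | _zotac_calc_crc
-- ===== SOURCE A (Python) =====
-- def _zotac_calc_crc(buffer):
--     crc = 0
--     for value in buffer[4:0x3E]:
--         h1 = (crc ^ value) & 0xFF
--         h2 = h1 & 0x0F
--         h3 = (h2 << 4) ^ h1
--         h4 = h3 >> 4
--         crc = (((((h3 << 1) ^ h4) << 4) ^ h2) << 3) ^ h4 ^ (crc >> 8)
--         crc &= 0xFFFF
--     return crc
-- ===== SOURCE B (Python) =====
-- def _zotac_calc_crc(buffer):
--     # Bit-by-bit CRC-16 with reflected polynomial 0x8408 (CRC-16/CCITT, "KERMIT"):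
--     # eight shift/xor rounds per byte instead of A's closed-form nibble arithmetic.
--     crc = 0
--     for value in buffer[4:0x3E]:
--         cur = (crc ^ value) & 0xFF
--         for _ in range(8):
--             if cur & 1:
--                 cur = (cur >> 1) ^ 0x8408
--             else:
--                 cur >>= 1
--         crc = cur ^ (crc >> 8)
--     return crc
-- ===== Notes on version B (the rewrite author's own statement) =====
-- stated objective: alternative
-- what changed: Replaces A's closed-form six-step nibble arithmetic per byte with the textbook bit-serial CRC-16 algorithm: an inner loop of eight shift-and-conditionally-xor rounds with the reflected polynomial 0x8408 (CRC-16/CCITT 'KERMIT'), which A's formula is an optimization of.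
import Mathlib
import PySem

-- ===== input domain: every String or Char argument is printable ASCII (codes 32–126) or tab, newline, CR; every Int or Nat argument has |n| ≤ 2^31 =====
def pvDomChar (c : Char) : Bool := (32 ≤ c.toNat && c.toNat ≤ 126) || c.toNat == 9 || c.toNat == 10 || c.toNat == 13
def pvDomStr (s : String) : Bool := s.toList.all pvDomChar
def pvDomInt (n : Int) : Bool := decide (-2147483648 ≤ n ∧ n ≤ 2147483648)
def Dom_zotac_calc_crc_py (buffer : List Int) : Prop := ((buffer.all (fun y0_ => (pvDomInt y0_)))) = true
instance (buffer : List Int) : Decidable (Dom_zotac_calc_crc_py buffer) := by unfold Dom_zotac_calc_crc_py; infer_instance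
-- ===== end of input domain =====

-- B computes the same CRC by the textbook bit-serial CRC-16 inner loop (poly 0x8408) instead of A's closed-form nibble arithmetic.

-- ===== PORT A =====
-- the body of A's for-loop
def zotacStepA (crc value : Int) : Int :=
  let h1 := PySem.Int.band (PySem.Int.bxor crc value) 0xFF
  let h2 := PySem.Int.band h1 0x0F
  let h3 := PySem.Int.bxor (h2 <<< (4:Nat)) h1
  let h4 := h3 >>> (4:Nat)
  PySem.Int.band
    (PySem.Int.bxor
      (PySem.Int.bxor ((PySem.Int.bxor ((PySem.Int.bxor (h3 <<< (1:Nat)) h4) <<< (4:Nat)) h2) <<< (3:Nat)) h4)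
      (crc >>> (8:Nat)))
    0xFFFF

def zotac_calc_crc_py (buffer : List Int) : Int :=
  (PySem.List.slice buffer (some 4) (some 0x3E)).foldl zotacStepA 0

-- ===== PORT B =====
-- the body of B's for-loop: eight shift/xor rounds (for _ in range(8)) on cur = (crc ^ value) & 0xFF
def zotacStepB (crc value : Int) : Int :=
  let cur0 := PySem.Int.band (PySem.Int.bxor crc value) 0xFF
  let cur := (PySem.List.pyRange 0 8 1).foldl
    (fun cur _ =>
      if PySem.Int.band cur 1 ≠ 0 then PySem.Int.bxor (cur >>> (1:Nat)) 0x8408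
      else cur >>> (1:Nat))
    cur0
  PySem.Int.bxor cur (crc >>> (8:Nat))

def zotac_calc_crc_py_alt (buffer : List Int) : Int :=
  (PySem.List.slice buffer (some 4) (some 0x3E)).foldl zotacStepB 0

-- ===== PRECONDITION & SPEC =====
def Spec_zotac_calc_crc_py (buffer : List Int) (out : Int) : Prop := out = zotac_calc_crc_py_alt buffer
instance (buffer : List Int) (out : Int) : Decidable (Spec_zotac_calc_crc_py buffer out) := by unfold Spec_zotac_calc_crc_py; infer_instance

-- ===== CLAIM (what is proved, stated in full; the proofs are below) =====
def Claim_equal_zotac_calc_crc_py : Prop := ∀ (buffer : List Int), Dom_zotac_calc_crc_py buffer → Spec_zotac_calc_crc_py buffer (zotac_calc_crc_py buffer)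

-- ===== LEMMAS AND PROOFS =====

-- x & m for a nonneg mask m lies in [0, m]
theorem zotac_band_mask_bounds (x m : Int) (hm : 0 ≤ m) :
    0 ≤ PySem.Int.band x m ∧ PySem.Int.band x m ≤ m := by
  unfold PySem.Int.band
  rcases Int.lt_or_le x 0 with hx | hx
  · rw [if_neg (by omega), if_pos hm]
    have : m.toNat - (m.toNat &&& (-x - 1).toNat) ≤ m.toNat := Nat.sub_le _ _
    omega
  · rw [if_pos hx, if_pos hm]
    have : x.toNat &&& m.toNat ≤ m.toNat := Nat.and_le_right
    omega

-- xor of two nonneg values below 2^n stays in [0, 2^n)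
theorem zotac_bxor_bounds {a b : Int} (n : Nat) (ha : 0 ≤ a) (hb : 0 ≤ b)
    (ha2 : a < (2:Int) ^ n) (hb2 : b < (2:Int) ^ n) :
    0 ≤ PySem.Int.bxor a b ∧ PySem.Int.bxor a b < (2:Int) ^ n := by
  unfold PySem.Int.bxor
  rw [if_pos ha, if_pos hb]
  have hcast : ((2:Int) ^ n) = ((2 ^ n : Nat) : Int) := by push_cast; ring
  have hx : a.toNat ^^^ b.toNat < 2 ^ n := Nat.xor_lt_two_pow (by omega) (by omega)
  refine ⟨by positivity, ?_⟩
  rw [hcast]; exact_mod_cast hx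

-- masking a value already below 2^n with 2^n - 1 is the identity
theorem zotac_band_mask_self {a : Int} (n : Nat) (ha : 0 ≤ a) (h : a < (2:Int) ^ n) :
    PySem.Int.band a ((2:Int) ^ n - 1) = a := by
  unfold PySem.Int.band
  have hpos : (0:Int) < 2 ^ n := by positivity
  rw [if_pos ha, if_pos (by linarith)]
  have hcast : ((2:Int) ^ n) = ((2 ^ n : Nat) : Int) := by push_cast; ring
  have hm : ((2:Int) ^ n - 1).toNat = 2 ^ n - 1 := by omega
  rw [hm, Nat.and_two_pow_sub_one_eq_mod, Nat.mod_eq_of_lt (by omega)]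
  omega

theorem zotac_shiftl_bounds {a : Int} (n k : Nat) (ha : 0 ≤ a) (h : a < (2:Int) ^ n) :
    0 ≤ a <<< k ∧ a <<< k < (2:Int) ^ (n + k) := by
  rw [Int.shiftLeft_eq]
  refine ⟨by positivity, ?_⟩
  calc a * 2 ^ k < (2:Int) ^ n * 2 ^ k := mul_lt_mul_of_pos_right h (by positivity)
    _ = (2:Int) ^ (n + k) := by ring

theorem zotac_shiftr_bounds {a : Int} (n k : Nat) (ha : 0 ≤ a) (h : a < (2:Int) ^ (n + k)) :
    0 ≤ a >>> k ∧ a >>> k < (2:Int) ^ n := by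
  rw [Int.shiftRight_eq_div_pow]
  refine ⟨Int.ediv_nonneg ha (by positivity), ?_⟩
  rw [Int.ediv_lt_iff_lt_mul (by positivity)]
  calc a < (2:Int) ^ (n + k) := h
    _ = (2:Int) ^ n * 2 ^ k := by ring

-- the raw (unmasked) per-byte mixing term of port A, as a function of h1 (let-free on purpose)
def zotacMix (h1 : Int) : Int :=
  PySem.Int.bxor
    ((PySem.Int.bxor
      ((PySem.Int.bxor
        ((PySem.Int.bxor ((PySem.Int.band h1 0x0F) <<< (4:Nat)) h1) <<< (1:Nat))
        ((PySem.Int.bxor ((PySem.Int.band h1 0x0F) <<< (4:Nat)) h1) >>> (4:Nat))) <<< (4:Nat))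
      (PySem.Int.band h1 0x0F)) <<< (3:Nat))
    ((PySem.Int.bxor ((PySem.Int.band h1 0x0F) <<< (4:Nat)) h1) >>> (4:Nat))

-- the eight bit-serial rounds of port B, as a function of the initial byte
def zotacLoop8 (cur0 : Int) : Int :=
  (PySem.List.pyRange 0 8 1).foldl
    (fun cur _ =>
      if PySem.Int.band cur 1 ≠ 0 then PySem.Int.bxor (cur >>> (1:Nat)) 0x8408
      else cur >>> (1:Nat))
    cur0

theorem zotacMix_bounds {h1 : Int} (h0 : 0 ≤ h1) (hlt : h1 < 256) :
    0 ≤ zotacMix h1 ∧ zotacMix h1 < 65536 := by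
  obtain ⟨h2a, h2b⟩ := zotac_band_mask_bounds h1 0x0F (by norm_num)
  obtain ⟨s4a, s4b⟩ := zotac_shiftl_bounds 4 4 h2a (by norm_num; omega)
  obtain ⟨h3a, h3b⟩ := zotac_bxor_bounds 8 s4a h0 (by norm_num at s4b ⊢; omega) (by norm_num; omega)
  obtain ⟨h4a, h4b⟩ := zotac_shiftr_bounds 4 4 h3a h3b
  obtain ⟨t1a, t1b⟩ := zotac_shiftl_bounds 8 1 h3a h3b
  obtain ⟨t2a, t2b⟩ := zotac_bxor_bounds 9 t1a h4a t1b (by norm_num at h4b ⊢; omega)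
  obtain ⟨t3a, t3b⟩ := zotac_shiftl_bounds 9 4 t2a t2b
  obtain ⟨t4a, t4b⟩ := zotac_bxor_bounds 13 t3a h2a t3b (by norm_num at h2b ⊢; omega)
  obtain ⟨t5a, t5b⟩ := zotac_shiftl_bounds 13 3 t4a t4b
  obtain ⟨t6a, t6b⟩ := zotac_bxor_bounds 16 t5a h4a t5b (by norm_num at h4b ⊢; omega)
  norm_num at t6b
  exact ⟨t6a, t6b⟩

-- A's closed-form nibble arithmetic equals B's eight bit-serial rounds, byte by byte
set_option maxRecDepth 4096 in
set_option maxHeartbeats 1000000 in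
theorem zotacMix_eq_loop8 : ∀ n : Fin 256, zotacMix (n.val : Int) = zotacLoop8 (n.val : Int) := by
  decide

-- one loop step of A equals one loop step of B, for a 16-bit crc
theorem zotac_step_eq (crc value : Int) (hc0 : 0 ≤ crc) (hclt : crc < 65536) :
    zotacStepA crc value = zotacStepB crc value := by
  obtain ⟨i0, ile⟩ := zotac_band_mask_bounds (PySem.Int.bxor crc value) 0xFF (by norm_num)
  set h1 := PySem.Int.band (PySem.Int.bxor crc value) 0xFF with hh1
  have hA : zotacStepA crc value
      = PySem.Int.band (PySem.Int.bxor (zotacMix h1) (crc >>> (8:Nat))) 0xFFFF := rfl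
  have hB : zotacStepB crc value
      = PySem.Int.bxor (zotacLoop8 h1) (crc >>> (8:Nat)) := rfl
  obtain ⟨ma, mb⟩ := zotacMix_bounds i0 (by omega)
  obtain ⟨sa, sb⟩ := zotac_shiftr_bounds 8 8 hc0 (by norm_num; omega)
  obtain ⟨xa, xb⟩ := zotac_bxor_bounds 16 ma sa (by norm_num; omega) (by norm_num at sb ⊢; omega)
  have hfull : PySem.Int.band (PySem.Int.bxor (zotacMix h1) (crc >>> (8:Nat))) 0xFFFF
      = PySem.Int.bxor (zotacMix h1) (crc >>> (8:Nat)) := by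
    have := zotac_band_mask_self 16 xa xb
    norm_num at this
    exact this
  have hmx : zotacMix h1 = zotacLoop8 h1 := by
    have h1eq : h1 = ((h1.toNat : Nat) : Int) := by omega
    have hfin : h1.toNat < 256 := by omega
    have := zotacMix_eq_loop8 ⟨h1.toNat, hfin⟩
    simpa [← h1eq] using this
  rw [hA, hB, hfull, hmx]

-- A's step always lands back in [0, 65536)
theorem zotac_stepA_bounds (crc value : Int) :
    0 ≤ zotacStepA crc value ∧ zotacStepA crc value < 65536 := by
  have hA : zotacStepA crc value
      = PySem.Int.band
          (PySem.Int.bxor (zotacMix (PySem.Int.band (PySem.Int.bxor crc value) 0xFF)) (crc >>> (8:Nat)))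
          0xFFFF := rfl
  rw [hA]
  obtain ⟨a, b⟩ := zotac_band_mask_bounds
    (PySem.Int.bxor (zotacMix (PySem.Int.band (PySem.Int.bxor crc value) 0xFF)) (crc >>> (8:Nat)))
    0xFFFF (by norm_num)
  exact ⟨a, by omega⟩

theorem zotac_foldl_eq (l : List Int) (crc : Int) (h0 : 0 ≤ crc) (hlt : crc < 65536) :
    l.foldl zotacStepA crc = l.foldl zotacStepB crc := by
  induction l generalizing crc with
  | nil => rfl
  | cons v t ih =>
    simp only [List.foldl_cons]
    rw [← zotac_step_eq crc v h0 hlt]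
    obtain ⟨a, b⟩ := zotac_stepA_bounds crc v
    exact ih _ a b

-- ===== VERDICT (by name: the statement is the Claim_ definition above) =====
theorem zotac_calc_crc_py_spec : Claim_equal_zotac_calc_crc_py := by
  intro buffer _
  unfold Spec_zotac_calc_crc_py zotac_calc_crc_py zotac_calc_crc_py_alt
  exact zotac_foldl_eq _ 0 (by norm_num) (by norm_num)
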